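-- pv_equiv track=rewrite | github.com/wxiaoyun/leetcode | finished/rotting_oranges.py | oneRoundOfRotting
-- ===== SOURCE A (Python) =====
-- from typing import List
-- import copy
--
-- def oneRoundOfRotting(
--     reference: List[List[int]], new: List[List[int]]
-- ) -> bool:
--     def isValidMove(r: int, c: int) -> bool:
--         if r < 0 or c < 0:
--             return False
--         if r >= len(reference) or c >= len(reference[r]):
--             return False
--         # the grid is fresh orange
--         return reference[r][c] == 1
--
--     moves = [[-1, 0], [1, 0], [0, -1], [0, 1]]
--
--     hasChanged = False
--     for r in range(len(reference)):
--         for c in range(len(reference[r])):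
--             for move in moves:
--                 if reference[r][c] == 2 and isValidMove(r + move[0], c + move[1]):
--                     new[r + move[0]][c + move[1]] = 2  # spreads the rot
--                     hasChanged = True
--
--     # # Update the reference
--     reference[:] = copy.deepcopy(new)
--
--     return hasChanged
-- ===== SOURCE B (Python) =====
-- from typing import List
-- import copy
--
-- def oneRoundOfRotting(
--     reference: List[List[int]], new: List[List[int]]
-- ) -> bool:
--     # Pull-based (gather) stencil: instead of scattering rot from rotten cells via
--     # move vectors, each FRESH cell looks at its row window (left/right) and the
--     # adjacent rows (up/down) and rots if any of those is rotten. Correct because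
--     # a fresh cell is written by A exactly when it has some rotten 4-neighbour.
--     rows = len(reference)
--     hasChanged = False
--     for r in range(rows):
--         row = reference[r]
--         up = reference[r - 1] if r > 0 else []
--         down = reference[r + 1] if r + 1 < rows else []
--         for c in range(len(row)):
--             if row[c] == 1 and (
--                 (c > 0 and row[c - 1] == 2)
--                 or (c + 1 < len(row) and row[c + 1] == 2)
--                 or (c < len(up) and up[c] == 2)
--                 or (c < len(down) and down[c] == 2)
--             ):
--                 new[r][c] = 2
--                 hasChanged = True
--
--     reference[:] = copy.deepcopy(new)
--     return hasChanged
-- ===== Notes on version B (the rewrite author's own statement) =====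
-- stated objective: alternative
-- what changed: A is push/scatter: it scans every cell, and from each rotten cell walks the four move vectors through an isValidMove helper to rot fresh neighbours; B is the dual pull/gather stencil: each FRESH cell inspects its own row window (left/right) and the adjacent up/down rows and rots itself if any of them is rotten - no move-vector table, no validity helper, no negative indices. Pre_ excludes only inputs where both programs raise IndexError (a rot target outside the shape of `new`).
import Mathlib
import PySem

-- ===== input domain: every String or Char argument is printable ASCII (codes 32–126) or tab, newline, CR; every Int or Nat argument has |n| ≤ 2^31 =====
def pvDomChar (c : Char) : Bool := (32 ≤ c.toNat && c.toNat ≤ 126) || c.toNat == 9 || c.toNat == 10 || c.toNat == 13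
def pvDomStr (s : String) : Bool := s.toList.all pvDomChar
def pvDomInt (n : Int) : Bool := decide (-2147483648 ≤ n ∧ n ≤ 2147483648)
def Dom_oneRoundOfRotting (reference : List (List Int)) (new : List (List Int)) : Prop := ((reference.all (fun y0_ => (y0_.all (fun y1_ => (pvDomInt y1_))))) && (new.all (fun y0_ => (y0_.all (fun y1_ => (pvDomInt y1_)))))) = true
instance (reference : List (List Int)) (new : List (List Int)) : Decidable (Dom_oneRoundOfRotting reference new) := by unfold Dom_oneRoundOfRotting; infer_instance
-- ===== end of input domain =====

-- B replaces A's push/scatter scan (from rotten cells through move vectors) by the dual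
-- pull/gather stencil (each fresh cell inspects left/right/up/down); objective: alternative.
-- Both Pythons mutate `new` and `reference` in place identically; the equivalence proved
-- here is about the RETURN value only, which depends on `reference` alone.

-- ===== PORT A =====
-- A's nested helper isValidMove: both list accesses are in range when reached
-- (short-circuit of the guards), so getD is exact there.
def pvIsValidMove (reference : List (List Int)) (r c : Int) : Bool :=
  if r < 0 ∨ c < 0 then false
  else if (reference.length : Int) ≤ r ∨ ((reference.getD r.toNat []).length : Int) ≤ c then false
  else (reference.getD r.toNat []).getD c.toNat 0 == 1

-- The writes `new[...] = 2` and `reference[:] = deepcopy(new)` only mutate the arguments;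
-- they never influence the returned Bool (isValidMove reads the ORIGINAL reference), so
-- this port models the return value; inputs where the write would raise are outside Pre_.
def oneRoundOfRotting (reference : List (List Int)) (new : List (List Int)) : Bool :=
  let moves : List (Int × Int) := [(-1, 0), (1, 0), (0, -1), (0, 1)]
  (List.range reference.length).foldl (fun h r =>
    (List.range (reference.getD r []).length).foldl (fun h c =>
      moves.foldl (fun h m =>
        if ((reference.getD r []).getD c 0 == 2)
            && pvIsValidMove reference ((r : Int) + m.1) ((c : Int) + m.2)
        then true else h) h) h) false

-- ===== PORT B =====
def oneRoundOfRotting_alt (reference : List (List Int)) (new : List (List Int)) : Bool :=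
  let rows := reference.length
  (List.range rows).foldl (fun h r =>
    let row := reference.getD r []
    let up := if 0 < r then reference.getD (r - 1) [] else []
    let down := if r + 1 < rows then reference.getD (r + 1) [] else []
    (List.range row.length).foldl (fun h c =>
      if (row.getD c 0 == 1)
          && ((decide (0 < c) && (row.getD (c - 1) 0 == 2))
            || (decide (c + 1 < row.length) && (row.getD (c + 1) 0 == 2))
            || (decide (c < up.length) && (up.getD c 0 == 2))
            || (decide (c < down.length) && (down.getD c 0 == 2)))
      then true else h) h) false

-- ===== PRECONDITION & SPEC =====
-- Pre_ excludes exactly the inputs on which the Python A raises IndexError: some fresh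
-- cell of `reference` adjacent to a rotten cell lies outside the shape of `new`, so the
-- write new[nr][nc] = 2 fails (B raises there too).
def Pre_oneRoundOfRotting (reference : List (List Int)) (new : List (List Int)) : Prop :=
  ∀ nr < reference.length, ∀ nc < (reference.getD nr []).length,
    (reference.getD nr []).getD nc 0 = 1 →
    (∃ r < reference.length, ∃ c < (reference.getD r []).length,
        (reference.getD r []).getD c 0 = 2 ∧
        ((r = nr ∧ (c + 1 = nc ∨ nc + 1 = c)) ∨ (c = nc ∧ (r + 1 = nr ∨ nr + 1 = r)))) →
    nr < new.length ∧ nc < (new.getD nr []).length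
instance (reference : List (List Int)) (new : List (List Int)) : Decidable (Pre_oneRoundOfRotting reference new) := by unfold Pre_oneRoundOfRotting; exact Nat.decidableBallLT _ _

def pvWitness_oneRoundOfRotting : List (List Int) × List (List Int) := ([[2, 1], [0]], [[5, 5], [0]])

def Spec_oneRoundOfRotting (reference : List (List Int)) (new : List (List Int)) (out : Bool) : Prop := out = oneRoundOfRotting_alt reference new
instance (reference : List (List Int)) (new : List (List Int)) (out : Bool) : Decidable (Spec_oneRoundOfRotting reference new out) := by unfold Spec_oneRoundOfRotting; infer_instance

-- ===== CLAIM (what is proved, stated in full; the proofs are below) =====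
def Claim_equal_oneRoundOfRotting : Prop := ∀ (reference : List (List Int)) (new : List (List Int)), Dom_oneRoundOfRotting reference new → Pre_oneRoundOfRotting reference new → Spec_oneRoundOfRotting reference new (oneRoundOfRotting reference new)

-- ===== LEMMAS AND PROOFS =====

-- the symmetric "some rotten cell has a fresh 4-neighbour" proposition both ports decide
def pvE (reference : List (List Int)) : Prop :=
  ∃ r, ∃ c, ∃ r', ∃ c',
    r < reference.length ∧ c < (reference.getD r []).length ∧
    r' < reference.length ∧ c' < (reference.getD r' []).length ∧
    (reference.getD r []).getD c 0 = 2 ∧ (reference.getD r' []).getD c' 0 = 1 ∧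
    ((r = r' ∧ (c' + 1 = c ∨ c + 1 = c')) ∨ (c = c' ∧ (r' + 1 = r ∨ r + 1 = r')))

-- a foldl that can only switch the accumulator to true is an `any`
theorem pvFoldlIfTrue {α : Type} (p : α → Bool) (l : List α) (b : Bool) :
    l.foldl (fun h x => if p x then true else h) b = (b || l.any p) := by
  induction l generalizing b with
  | nil => simp
  | cons x xs ih =>
    simp only [List.foldl_cons, List.any_cons]
    rw [ih]
    cases p x <;> simp

-- a foldl that ors in a Bool per element is an `any`
theorem pvFoldlOr {α : Type} (p : α → Bool) (l : List α) (b : Bool) :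
    l.foldl (fun h x => (h || p x)) b = (b || l.any p) := by
  induction l generalizing b with
  | nil => simp
  | cons x xs ih => simp [List.foldl_cons, ih, Bool.or_assoc]

-- A's isValidMove, characterised on Nat coordinates
theorem pvValid_iff (reference : List (List Int)) (x y : Int) :
    pvIsValidMove reference x y = true ↔
      ∃ a b : Nat, x = (a : Int) ∧ y = (b : Int) ∧ a < reference.length ∧
        b < (reference.getD a []).length ∧ (reference.getD a []).getD b 0 = 1 := by
  unfold pvIsValidMove
  split_ifs with h1 h2
  · simp only [Bool.false_eq_true, false_iff]
    rintro ⟨a, b, rfl, rfl, -⟩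
    omega
  · simp only [Bool.false_eq_true, false_iff]
    push_neg at h1
    rintro ⟨a, b, rfl, rfl, ha, hb, -⟩
    simp only [Int.toNat_natCast] at h2
    omega
  · push_neg at h1 h2
    simp only [beq_iff_eq]
    constructor
    · intro hval
      exact ⟨x.toNat, y.toNat, (Int.toNat_of_nonneg h1.1).symm, (Int.toNat_of_nonneg h1.2).symm,
        by omega, by omega, hval⟩
    · rintro ⟨a, b, rfl, rfl, -, -, hval⟩
      simpa using hval

theorem pvA_iff (reference : List (List Int)) (new : List (List Int)) :
    oneRoundOfRotting reference new = true ↔ pvE reference := by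
  unfold oneRoundOfRotting
  simp only [pvFoldlIfTrue, pvFoldlOr, Bool.false_or]
  simp only [List.any_eq_true, List.mem_range, List.any_cons, List.any_nil, Bool.or_false,
    Bool.and_eq_true, Bool.or_eq_true, beq_iff_eq]
  constructor
  · rintro ⟨r, hr, c, hc, hcase⟩
    -- hcase: disjunction over the four moves, each (rot ∧ valid)
    rcases hcase with ⟨h2, hv⟩ | ⟨h2, hv⟩ | ⟨h2, hv⟩ | ⟨h2, hv⟩ <;>
      · rw [pvValid_iff] at hv
        obtain ⟨a, b, hx, hy, ha, hb, hval⟩ := hv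
        exact ⟨r, c, a, b, hr, hc, ha, hb, h2, hval, by omega⟩
  · rintro ⟨r, c, r', c', hr, hc, hr', hc', h2, h1, hadj⟩
    refine ⟨r, hr, c, hc, ?_⟩
    rcases hadj with ⟨hre, hl | hrt⟩ | ⟨hce, hu | hd⟩
    · -- c' + 1 = c : fresh is the LEFT neighbour, move (0,-1)
      refine Or.inr (Or.inr (Or.inl ⟨h2, ?_⟩))
      rw [pvValid_iff]
      exact ⟨r', c', by omega, by omega, hr', hc', h1⟩
    · -- c + 1 = c' : fresh is the RIGHT neighbour, move (0,1)
      refine Or.inr (Or.inr (Or.inr ⟨h2, ?_⟩))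
      rw [pvValid_iff]
      exact ⟨r', c', by omega, by omega, hr', hc', h1⟩
    · -- r' + 1 = r : fresh is UP, move (-1,0)
      refine Or.inl ⟨h2, ?_⟩
      rw [pvValid_iff]
      exact ⟨r', c', by omega, by omega, hr', hc', h1⟩
    · -- r + 1 = r' : fresh is DOWN, move (1,0)
      refine Or.inr (Or.inl ⟨h2, ?_⟩)
      rw [pvValid_iff]
      exact ⟨r', c', by omega, by omega, hr', hc', h1⟩

theorem pvB_iff (reference : List (List Int)) (new : List (List Int)) :
    oneRoundOfRotting_alt reference new = true ↔ pvE reference := by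
  unfold oneRoundOfRotting_alt
  simp only [pvFoldlIfTrue, pvFoldlOr, Bool.false_or]
  simp only [List.any_eq_true, List.mem_range, Bool.and_eq_true, Bool.or_eq_true,
    decide_eq_true_eq, beq_iff_eq]
  constructor
  · rintro ⟨r, hr, c, hc, h1, hnb⟩
    rcases hnb with ((⟨hcpos, h2⟩ | ⟨hcb, h2⟩) | ⟨hcu, h2⟩) | ⟨hcd, h2⟩
    · exact ⟨r, c - 1, r, c, hr, by omega, hr, hc, h2, h1, by omega⟩
    · exact ⟨r, c + 1, r, c, hr, hcb, hr, hc, h2, h1, by omega⟩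
    · -- up list: nonempty index forces 0 < r
      by_cases hrpos : 0 < r
      · rw [if_pos hrpos] at hcu h2
        exact ⟨r - 1, c, r, c, by omega, hcu, hr, hc, h2, h1, by omega⟩
      · rw [if_neg hrpos] at hcu; simp at hcu
    · by_cases hrb : r + 1 < reference.length
      · rw [if_pos hrb] at hcd h2
        exact ⟨r + 1, c, r, c, hrb, hcd, hr, hc, h2, h1, by omega⟩
      · rw [if_neg hrb] at hcd; simp at hcd
  · rintro ⟨r, c, r', c', hr, hc, hr', hc', h2, h1, hadj⟩
    refine ⟨r', hr', c', hc', h1, ?_⟩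
    rcases hadj with ⟨hre, hl | hrt⟩ | ⟨hce, hu | hd⟩
    · -- rotten is the RIGHT neighbour of fresh (c' + 1 = c)
      subst hre
      refine Or.inl (Or.inl (Or.inr ⟨by omega, ?_⟩))
      have : c' + 1 = c := hl
      rw [this]; exact h2
    · -- rotten is the LEFT neighbour of fresh (c + 1 = c')
      refine Or.inl (Or.inl (Or.inl ⟨by omega, ?_⟩))
      subst hre
      have : c' - 1 = c := by omega
      rw [this]; exact h2
    · -- rotten is the DOWN neighbour of fresh (r' + 1 = r)
      refine Or.inr ?_
      have hrb : r' + 1 < reference.length := by omega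
      rw [if_pos hrb]
      have : r' + 1 = r := hu
      rw [this]
      exact ⟨by omega, by subst hce; exact h2⟩
    · -- rotten is the UP neighbour of fresh (r + 1 = r')
      refine Or.inl (Or.inr ?_)
      have hrpos : 0 < r' := by omega
      rw [if_pos hrpos]
      have : r' - 1 = r := by omega
      rw [this]
      exact ⟨by omega, by subst hce; exact h2⟩

-- ===== VERDICT (by name: the statement is the Claim_ definition above) =====
theorem oneRoundOfRotting_spec : Claim_equal_oneRoundOfRotting := by
  intro reference new _ _
  unfold Spec_oneRoundOfRotting
  rw [Bool.eq_iff_iff, pvA_iff, pvB_iff]
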